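-- pv_equiv track=rewrite | github.com/Tsq0313/google-foobar-challenge | foobar-challenge-problems/please-pass-the-coded-messages/solution.py | buildInt
-- ===== SOURCE A (Python) =====
-- def buildInt(l):
--     l = list(l)
--     l.reverse()
--     res = 0
--     size = len(l) - 1
--     while size >= 0:
--         res *= 10
--         res += l[size]
--         size -= 1
--
--     return res
-- ===== SOURCE B (Python) =====
-- def buildInt(l):
--     res = 0
--     pw = 10 ** len(list(l))
--     for d in l:
--         pw //= 10
--         res += d * pw
--     return res
-- ===== Notes on version B (the rewrite author's own statement) =====
-- stated objective: simpler
-- what changed: Replaces A's reverse-then-backward-index Horner multiply-accumulate loop by a single forward pass that sums each digit times its positional power-of-ten weight, maintained by one division per step.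
import Mathlib
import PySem

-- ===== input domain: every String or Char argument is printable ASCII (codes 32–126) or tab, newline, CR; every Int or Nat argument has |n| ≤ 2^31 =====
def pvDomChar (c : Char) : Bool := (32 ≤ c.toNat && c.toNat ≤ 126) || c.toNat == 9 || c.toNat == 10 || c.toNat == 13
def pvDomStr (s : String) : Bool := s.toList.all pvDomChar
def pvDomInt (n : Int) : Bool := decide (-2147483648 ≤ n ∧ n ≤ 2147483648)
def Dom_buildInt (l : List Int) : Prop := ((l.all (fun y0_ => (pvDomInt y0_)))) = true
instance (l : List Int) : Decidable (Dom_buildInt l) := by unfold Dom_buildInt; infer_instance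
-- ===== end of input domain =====

-- B replaces A's reverse + backward-index Horner loop by a forward positional-weight sum (objective: simpler).

-- ===== PORT A =====
-- A's while loop: size runs from len(rl)-1 down to 0, res = res*10 + rl[size];
-- modelled by recursion on n = size+1 (the number of iterations left).
-- rl.getD n 0 is exact here: the loop only reads in-range indices.
def buildIntGo (rl : List Int) : Nat → Int → Int
  | 0, res => res
  | n + 1, res => buildIntGo rl n (res * 10 + rl.getD n 0)

def buildInt (l : List Int) : Int :=
  let rl := l.reverse
  buildIntGo rl rl.length 0

-- ===== PORT B =====
-- pw starts at 10**len(l); each step: pw //= 10; res += d * pw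
def buildIntAltGo : List Int → Int → Int → Int
  | [], _, res => res
  | d :: rest, pw, res =>
      let pw' := PySem.Int.floordiv pw 10
      buildIntAltGo rest pw' (res + d * pw')

def buildInt_alt (l : List Int) : Int :=
  buildIntAltGo l ((10 : Int) ^ l.length) 0

-- ===== PRECONDITION & SPEC =====
def Spec_buildInt (l : List Int) (out : Int) : Prop := out = buildInt_alt l
instance (l : List Int) (out : Int) : Decidable (Spec_buildInt l out) := by unfold Spec_buildInt; infer_instance

-- ===== CLAIM (what is proved, stated in full; the proofs are below) =====
def Claim_equal_buildInt : Prop := ∀ (l : List Int), Dom_buildInt l → Spec_buildInt l (buildInt l)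

-- ===== LEMMAS AND PROOFS =====

-- common yardstick: Horner's fold over the digit list, front to back
def hornerFold (l : List Int) (a : Int) : Int := l.foldl (fun r x => r * 10 + x) a

theorem buildIntGo_eq_foldl (rl : List Int) :
    ∀ n, n ≤ rl.length → ∀ res, buildIntGo rl n res = hornerFold ((rl.take n).reverse) res := by
  intro n
  induction n with
  | zero => intro _ res; simp [buildIntGo, hornerFold]
  | succ m ih =>
    intro h res
    have hm : m < rl.length := Nat.lt_of_succ_le h
    have htake : rl.take (m + 1) = rl.take m ++ [rl[m]] := by
      rw [List.take_add_one, List.getElem?_eq_getElem hm]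
      rfl
    have hg : rl.getD m 0 = rl[m] := List.getD_eq_getElem rl 0 hm
    rw [buildIntGo, ih (Nat.le_of_lt hm), htake, List.reverse_append]
    simp only [List.reverse_singleton, List.singleton_append, hornerFold, List.foldl_cons, hg]

theorem hornerFold_acc (l : List Int) : ∀ a : Int,
    hornerFold l a = a * (10 : Int) ^ l.length + hornerFold l 0 := by
  induction l with
  | nil => intro a; simp [hornerFold]
  | cons x rest ih =>
    intro a
    have h1 := ih (a * 10 + x)
    have h2 := ih x
    simp only [hornerFold, List.foldl_cons, List.length_cons, zero_mul, zero_add] at *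
    rw [h1, h2]
    ring

theorem floordiv_pow_ten (k : Nat) :
    PySem.Int.floordiv ((10 : Int) ^ (k + 1)) 10 = (10 : Int) ^ k := by
  have : (10 : Int) ^ (k + 1) = (10 : Int) ^ k * 10 := by ring
  simp [PySem.Int.floordiv, this, Int.mul_fdiv_cancel _ (by norm_num : (10 : Int) ≠ 0)]

theorem buildIntAltGo_add : ∀ (m : List Int) (pw a : Int),
    buildIntAltGo m pw a = a + buildIntAltGo m pw 0 := by
  intro m
  induction m with
  | nil => intro pw a; simp [buildIntAltGo]
  | cons e tl ihm =>
    intro pw a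
    simp only [buildIntAltGo]
    rw [ihm (PySem.Int.floordiv pw 10) (a + e * PySem.Int.floordiv pw 10),
        ihm (PySem.Int.floordiv pw 10) (0 + e * PySem.Int.floordiv pw 10)]
    ring

theorem buildIntAltGo_eq : ∀ (l : List Int),
    buildIntAltGo l ((10 : Int) ^ l.length) 0 = hornerFold l 0 := by
  intro l
  induction l with
  | nil => simp [buildIntAltGo, hornerFold]
  | cons d rest ih =>
    have hh : hornerFold (d :: rest) 0 = d * (10 : Int) ^ rest.length + hornerFold rest 0 := by
      have := hornerFold_acc rest d
      simp only [hornerFold, List.foldl_cons] at *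
      simpa using this
    simp only [buildIntAltGo, List.length_cons, floordiv_pow_ten, zero_add]
    rw [buildIntAltGo_add, ih, hh]

theorem buildInt_eq_horner (l : List Int) : buildInt l = hornerFold l 0 := by
  unfold buildInt
  rw [buildIntGo_eq_foldl l.reverse l.reverse.length (le_refl _) 0,
    List.take_length, List.reverse_reverse]

-- ===== VERDICT (by name: the statement is the Claim_ definition above) =====
theorem buildInt_spec : Claim_equal_buildInt := by
  intro l _
  unfold Spec_buildInt buildInt_alt
  rw [buildInt_eq_horner, buildIntAltGo_eq l]
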